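-- pv_equiv track=rewrite | github.com/BolotZhusupekov07/midterm-web | quote/services.py | get_three_longest_words
-- ===== SOURCE A (Python) =====
-- from typing import List
--
-- def get_three_longest_words(words: List[str]) -> str:
--     """Return three longest words in a list as a string."""
--     words = list(set(words))
--     words.sort(key=lambda item: (-len(item), item))
--     result = ""
--     if len(words) > 3:
--         for place, word in enumerate(words[:3], start=1):
--             result += f"{place}. {word}; "
--     else:
--         for place, word in enumerate(words, start=1):
--             result += f"{place}. {word}; "
--     return result.strip()
-- ===== SOURCE B (Python) =====
-- def get_three_longest_words(words):
--     """Return three longest words in a list as a string."""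
--     pool = set(words)
--     picked = []
--     while pool and len(picked) < 3:
--         best = min(pool, key=lambda w: (-len(w), w))
--         pool.discard(best)
--         picked.append(best)
--     parts = [f"{place}. {word}" for place, word in enumerate(picked, start=1)]
--     return "; ".join(parts) + ";" if picked else ""
-- ===== Notes on version B (the rewrite author's own statement) =====
-- stated objective: alternative
-- what changed: B replaces A's dedup + full sort by key (-len, word) + slice with three repeated min-selection scans over the deduplicated pool (pick the best, remove it, repeat up to three times), and assembles the result with '; '.join plus a trailing ';' instead of building 'f"{place}. {word}; "' strings and stripping.
import Mathlib
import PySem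

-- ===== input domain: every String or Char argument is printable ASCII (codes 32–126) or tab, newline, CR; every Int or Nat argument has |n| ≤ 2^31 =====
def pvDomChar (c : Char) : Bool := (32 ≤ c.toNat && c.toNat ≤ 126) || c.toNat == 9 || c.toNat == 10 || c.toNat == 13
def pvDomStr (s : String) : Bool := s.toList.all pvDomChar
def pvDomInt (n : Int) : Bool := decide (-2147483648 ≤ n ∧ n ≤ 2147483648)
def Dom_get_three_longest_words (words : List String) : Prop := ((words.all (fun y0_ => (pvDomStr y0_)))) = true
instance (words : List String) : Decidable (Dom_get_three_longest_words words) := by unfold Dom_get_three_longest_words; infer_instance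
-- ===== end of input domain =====

-- B replaces A's dedup + full sort + slice by three min-selection scans over the deduplicated pool (same result, no sort); objective: alternative.

-- ===== PORT A =====
-- literal port of A: words = list(set(words)); sort by (-len(item), item); take [:3] if len > 3;
-- build "f'{place}. {word}; '" by += over enumerate(..., start=1); return result.strip().
-- (strings are built at the PySem.Chars level — List Char — and wrapped with String.mk at the end; exact for str concatenation)
def get_three_longest_words (words : List String) : String :=
  let ws : PySem.Set String := PySem.Set.ofList words
  let sortedWs := PySem.List.sorted2 ws (fun item => -(PySem.Str.len item)) (fun item => item) false
  -- words[:3] with a nonnegative literal bound is List.take 3 — exact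
  let chosen := if 3 < PySem.List.len ws then sortedWs.take 3 else sortedWs
  let result : List Char := (PySem.List.enumerate chosen 1).foldl
      (fun acc pw => acc ++ (PySem.Int.toChars pw.1 ++ (". ".toList ++ (pw.2.toList ++ "; ".toList)))) []
  String.mk (PySem.Chars.strip result)

-- ===== PORT B =====
-- the while-loop of Source B: at most `fuel` times (len(picked) < 3), pick min(pool, key=(-len(w), w)), discard, append
def pvPick : Nat → PySem.Set String → List String
  | 0, _ => []
  | n + 1, pool =>
    match PySem.List.min2? pool (fun w => -(PySem.Str.len w)) (fun w => w) with
    | none => []                     -- pool empty: while-condition fails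
    | some best => best :: pvPick n (PySem.Set.discard pool best)

def get_three_longest_words_alt (words : List String) : String :=
  let picked := pvPick 3 (PySem.Set.ofList words)
  let parts := (PySem.List.enumerate picked 1).map
      (fun pw => PySem.Int.toChars pw.1 ++ (". ".toList ++ pw.2.toList))
  if picked.isEmpty then "" else String.mk (PySem.Chars.join "; ".toList parts ++ [';'])

-- ===== PRECONDITION & SPEC =====
def Spec_get_three_longest_words (words : List String) (out : String) : Prop := out = get_three_longest_words_alt words
instance (words : List String) (out : String) : Decidable (Spec_get_three_longest_words words out) := by unfold Spec_get_three_longest_words; infer_instance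

-- ===== CLAIM (what is proved, stated in full; the proofs are below) =====
def Claim_equal_get_three_longest_words : Prop := ∀ (words : List String), Dom_get_three_longest_words words → Spec_get_three_longest_words words (get_three_longest_words words)

-- ===== LEMMAS AND PROOFS =====

-- Python's sort key (-len(w), w) as a single key into the lexicographic order on Int × String
def pvKey (w : String) : Lex (Int × String) := toLex (-(PySem.Str.len w), w)

theorem pvKey_inj : Function.Injective pvKey := by
  intro a b h
  simpa [pvKey] using congrArg (fun p => (ofLex p).2) h

theorem pvLt_eq (a b : String) :
    (decide ((-(PySem.Str.len a)) < -(PySem.Str.len b)) ||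
      (!decide ((-(PySem.Str.len b)) < -(PySem.Str.len a)) && decide (a < b))) =
    decide (pvKey a < pvKey b) := by
  rw [Bool.eq_iff_iff]
  simp only [pvKey, Bool.or_eq_true, Bool.and_eq_true, Bool.not_eq_true', decide_eq_true_eq,
    decide_eq_false_iff_not, Prod.Lex.toLex_lt_toLex]
  constructor
  · rintro (h | ⟨h2, h3⟩)
    · exact Or.inl h
    · rcases lt_trichotomy (-(PySem.Str.len a)) (-(PySem.Str.len b)) with h | h | h
      · exact Or.inl h
      · exact Or.inr ⟨h, h3⟩
      · exact absurd h h2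
  · rintro (h | ⟨h2, h3⟩)
    · exact Or.inl h
    · exact Or.inr ⟨by omega, h3⟩

theorem sorted2_eq (xs : List String) :
    PySem.List.sorted2 xs (fun w => -(PySem.Str.len w)) (fun w => w) false =
    PySem.List.sorted xs pvKey := by
  simp only [PySem.List.sorted2, PySem.List.sorted]
  congr 1
  funext acc x
  congr 1
  funext a b
  simpa using pvLt_eq a b

theorem min2_eq (xs : List String) :
    PySem.List.min2? xs (fun w => -(PySem.Str.len w)) (fun w => w) =
    PySem.List.min? xs pvKey := by
  simp only [PySem.List.min2?, PySem.List.min?]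
  congr 1
  funext acc x
  cases acc with
  | none => rfl
  | some m =>
    dsimp only
    rw [pvLt_eq]
    simp

theorem sorted_cons_step (pool : List String) (m : String) (t : List String)
    (hnd : pool.Nodup) (h : PySem.List.sorted pool pvKey = m :: t) :
    PySem.List.min? pool pvKey = some m ∧
    PySem.List.sorted (pool.erase m) pvKey = t := by
  have hperm : (m :: t).Perm pool := h ▸ PySem.List.sorted_perm pool pvKey false
  have hmmem : m ∈ pool := hperm.mem_iff.1 (List.mem_cons_self)
  have hmin : ∀ y ∈ pool, pvKey m ≤ pvKey y := PySem.List.key_head_sorted_le pool pvKey h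
  constructor
  · cases hm' : PySem.List.min? pool pvKey with
    | none => exact absurd ((PySem.List.min?_eq_none_iff pool pvKey).1 hm' ▸ hmmem) (List.not_mem_nil)
    | some m' =>
      have h1 : pvKey m' ≤ pvKey m := PySem.List.min?_isMin hm' m hmmem
      have h2 : pvKey m ≤ pvKey m' := hmin m' (PySem.List.min?_mem hm')
      exact congrArg some (pvKey_inj (le_antisymm h1 h2))
  · have hndct : (m :: t).Nodup := (hperm.nodup_iff).2 hnd
    have hpw : (m :: t).Pairwise (fun a b => pvKey a ≤ pvKey b) := by
      rw [← h]; exact PySem.List.sorted_pairwise pool pvKey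
    apply PySem.List.sorted_eq_of_perm_of_pairwise_lt
    · have hp2 := hperm.erase m
      rw [List.erase_cons_head] at hp2
      exact hp2.symm.symm
    · have hle : t.Pairwise (fun a b => pvKey a ≤ pvKey b) := hpw.of_cons
      have hne : t.Pairwise (fun a b => a ≠ b) := (List.nodup_cons.1 hndct).2
      exact (hle.and hne).imp (fun h => lt_of_le_of_ne h.1 (fun hk => h.2 (pvKey_inj hk)))

theorem discard_eq_erase (pool : List String) (m : String) (hnd : pool.Nodup) :
    PySem.Set.discard pool m = pool.erase m := by
  rw [PySem.Set.discard, hnd.erase_eq_filter]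
  simp [bne]

theorem pick_eq_take (n : Nat) (pool : List String) (hnd : pool.Nodup) :
    pvPick n pool = (PySem.List.sorted pool pvKey).take n := by
  induction n generalizing pool with
  | zero => rfl
  | succ k ih =>
    cases hs : PySem.List.sorted pool pvKey with
    | nil =>
      have hpool : pool = [] := (PySem.List.sorted_eq_nil_iff pool pvKey false).1 hs
      subst hpool; rfl
    | cons m t =>
      obtain ⟨hmin, htail⟩ := sorted_cons_step pool m t hnd hs
      simp only [pvPick]
      rw [min2_eq, hmin]
      dsimp only
      rw [discard_eq_erase pool m hnd, ih (pool.erase m) (hnd.erase m), htail]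
      rfl

-- the formatted piece f"{place}. {word}" as built by B
def pvFmt (pw : Int × String) : List Char :=
  PySem.Int.toChars pw.1 ++ (". ".toList ++ pw.2.toList)

theorem flatMap_fmt (xs : List (Int × String)) (h : xs ≠ []) :
    List.flatMap (fun pw => pvFmt pw ++ "; ".toList) xs =
    "; ".toList.intercalate (xs.map pvFmt) ++ "; ".toList := by
  induction xs with
  | nil => exact absurd rfl h
  | cons a l ih =>
    cases l with
    | nil => simp [List.intercalate]
    | cons b r =>
      rw [List.flatMap_cons, ih (by simp), List.map_cons]
      simp [List.intercalate, List.intersperse]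

theorem lstrip_cons_nonspace (c : Char) (cs : List Char) (h : PySem.Chars.isspace c = false) :
    PySem.Chars.lstrip (c :: cs) = c :: cs := by
  simp [PySem.Chars.lstrip, List.dropWhile_cons, h]

theorem rstrip_append_space (xs : List Char) :
    PySem.Chars.rstrip (xs ++ [' ']) = PySem.Chars.rstrip xs := by
  have h : PySem.Chars.isspace ' ' = true := by decide
  simp [PySem.Chars.rstrip, List.dropWhile_cons, h]

theorem rstrip_append_nonspace (xs : List Char) (c : Char) (h : PySem.Chars.isspace c = false) :
    PySem.Chars.rstrip (xs ++ [c]) = xs ++ [c] := by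
  simp [PySem.Chars.rstrip, List.dropWhile_cons, h]

theorem intercalate_head (sep p : List Char) (ps : List (List Char)) :
    ∃ r, sep.intercalate (p :: ps) = p ++ r := by
  cases ps with
  | nil => exact ⟨[], by simp [List.intercalate]⟩
  | cons q qs =>
    exact ⟨sep ++ sep.intercalate (q :: qs), by simp [List.intercalate, List.intersperse]⟩

-- A's whole body (after the sorted2 bridge) equals B's whole body, for any deduplicated pool
theorem main_eq (ws : List String) (hnd : ws.Nodup) :
    String.mk (PySem.Chars.strip ((PySem.List.enumerate
        (if 3 < PySem.List.len ws then (PySem.List.sorted ws pvKey).take 3 else PySem.List.sorted ws pvKey) 1).foldl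
      (fun acc pw => acc ++ (PySem.Int.toChars pw.1 ++ (". ".toList ++ (pw.2.toList ++ "; ".toList)))) [])) =
    (if (pvPick 3 ws).isEmpty then "" else
      String.mk (PySem.Chars.join "; ".toList ((PySem.List.enumerate (pvPick 3 ws) 1).map
        (fun pw => PySem.Int.toChars pw.1 ++ (". ".toList ++ pw.2.toList))) ++ [';'])) := by
  cases hs : PySem.List.sorted ws pvKey with
  | nil =>
    have hw : ws = [] := (PySem.List.sorted_eq_nil_iff ws pvKey false).1 hs
    subst hw
    decide
  | cons m t =>
    have hlen : (PySem.List.sorted ws pvKey).length = ws.length :=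
      (PySem.List.sorted_perm ws pvKey false).length_eq
    have hchosen : (if 3 < PySem.List.len ws then (m :: t).take 3 else (m :: t)) =
        m :: t.take 2 := by
      by_cases h3 : 3 < PySem.List.len ws
      · rw [if_pos h3]; rfl
      · rw [if_neg h3]
        have hle : t.length ≤ 2 := by
          rw [hs] at hlen
          simp only [PySem.List.len] at h3
          simp only [List.length_cons] at hlen
          omega
        rw [List.take_of_length_le hle]
    rw [hchosen, pick_eq_take 3 ws hnd, hs]
    have hc : (m :: t).take 3 = m :: t.take 2 := rfl
    rw [hc]
    rw [PySem.List.foldl_append_eq_flatMap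
      (g := fun pw : Int × String => PySem.Int.toChars pw.1 ++ (". ".toList ++ (pw.2.toList ++ "; ".toList)))]
    rw [List.nil_append]
    have hg : (fun pw : Int × String =>
        PySem.Int.toChars pw.1 ++ (". ".toList ++ (pw.2.toList ++ "; ".toList))) =
        (fun pw => pvFmt pw ++ "; ".toList) := by
      funext pw; simp [pvFmt]
    rw [hg]
    rw [flatMap_fmt _ (by rw [PySem.List.enumerate_cons]; exact List.cons_ne_nil _ _)]
    rw [if_neg (by simp)]
    -- both sides are String.mk of lists; reduce to list equality
    set parts := (PySem.List.enumerate (m :: List.take 2 t) 1).map pvFmt with hparts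
    have hpartsB : (PySem.List.enumerate (m :: List.take 2 t) 1).map
        (fun pw => PySem.Int.toChars pw.1 ++ (". ".toList ++ pw.2.toList)) = parts := rfl
    rw [hpartsB, PySem.Chars.join]
    set z := "; ".toList.intercalate parts with hzdef
    -- head of z is the digit '1'
    have hpcons : parts = ('1' :: (". ".toList ++ m.toList)) ::
        ((PySem.List.enumerate (List.take 2 t) 2).map pvFmt) := by
      rw [hparts, PySem.List.enumerate_cons, List.map_cons]
      have h1 : PySem.Int.toChars 1 = ['1'] := by decide
      norm_num [pvFmt, h1]
    obtain ⟨r, hz⟩ := intercalate_head "; ".toList ('1' :: (". ".toList ++ m.toList))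
      ((PySem.List.enumerate (List.take 2 t) 2).map pvFmt)
    rw [hpcons] at hzdef
    rw [hz] at hzdef
    -- strip removes exactly the final space
    have hsplit : z ++ "; ".toList = (z ++ [';']) ++ [' '] := by simp
    have hstrip : PySem.Chars.strip (z ++ "; ".toList) = z ++ [';'] := by
      rw [PySem.Chars.strip]
      have hl : PySem.Chars.lstrip (z ++ "; ".toList) = z ++ "; ".toList := by
        rw [hzdef, List.cons_append]
        exact lstrip_cons_nonspace _ _ (by decide)
      rw [hl, hsplit, rstrip_append_space]
      exact rstrip_append_nonspace _ _ (by decide)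
    rw [hstrip]

-- ===== VERDICT (by name: the statement is the Claim_ definition above) =====
theorem get_three_longest_words_spec : Claim_equal_get_three_longest_words := by
  intro words _
  unfold Spec_get_three_longest_words get_three_longest_words get_three_longest_words_alt
  dsimp only
  rw [sorted2_eq]
  exact main_eq (PySem.Set.ofList words) (PySem.Set.nodup_ofList words)
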